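-- pv_equiv track=rewrite | github.com/danrleypereira/online-challenges | withgoogle/foobar/level2/please-pass-the-coded-messages/solution.py | solution
-- ===== SOURCE A (Python) =====
-- def sort_and_reverse(l: list):
--     l.sort()
--     l.reverse()
--     return l
--
-- def is3multiple(l: list):
--     # if empty get out of the loop
--     if len(l) == 0:
--         return True
--     return sum(l) % 3 == 0
--
-- def transformListInNumber(l: list):
--     my_list = l
--     my_list.sort()
--     the_number = 0
--     for index, number in enumerate(my_list):
--         place_value = 1
--         for _ in range(index):
--             place_value *= 10
--         the_number += ( number * place_value )
--     return the_number
--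
-- def solution(l):
--     # aparently l is a set
--     data_as_list =  list(l)
--     data_as_list = sort_and_reverse(data_as_list)
--     while not is3multiple(data_as_list):
--         data_as_list.pop()
--     if len(data_as_list) != 0:
--         return transformListInNumber(data_as_list)
--     # if couldn't find a divisible number
--     else:
--         for number in sort_and_reverse(list(l)):
--             if number % 3 == 0:
--                 return number
--     return 0
-- ===== SOURCE B (Python) =====
-- def solution(l):
--     desc = sorted(l)[::-1]
--     best = None
--     num = 0
--     s = 0
--     for x in desc:
--         num = num * 10 + x
--         s += x
--         if s % 3 == 0:
--             best = num
--     if best is not None: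
--         return best
--     for x in desc:
--         if x % 3 == 0:
--             return x
--     return 0
-- ===== Notes on version B (the rewrite author's own statement) =====
-- stated objective: faster
-- what changed: B replaces A's destructive pop-until-divisible loop (which re-sums the whole list per pop) and A's per-digit power-of-ten table by a single forward scan over the descending sort that maintains a running sum and a Horner value and records the longest prefix whose sum is divisible by 3.
import Mathlib
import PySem

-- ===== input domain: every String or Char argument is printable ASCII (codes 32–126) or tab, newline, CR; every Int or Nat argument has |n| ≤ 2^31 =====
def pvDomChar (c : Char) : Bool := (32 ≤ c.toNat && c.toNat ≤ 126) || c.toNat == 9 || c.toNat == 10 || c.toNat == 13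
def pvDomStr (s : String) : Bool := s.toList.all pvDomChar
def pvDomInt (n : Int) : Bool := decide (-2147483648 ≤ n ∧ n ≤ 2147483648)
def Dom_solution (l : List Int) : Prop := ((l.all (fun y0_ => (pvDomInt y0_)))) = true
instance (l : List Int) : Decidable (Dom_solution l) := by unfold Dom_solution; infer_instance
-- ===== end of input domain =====

-- B replaces A's pop-until-divisible loop and per-digit power table by one forward scan over
-- the descending sort that records the longest prefix divisible by 3 (objective: faster).

-- ===== PORT A =====
def sort_and_reverse (l : List Int) : List Int :=
  (PySem.List.sorted l (fun x => x)).reverse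

def is3multiple (l : List Int) : Bool :=
  if l.length = 0 then true else PySem.Int.mod l.sum 3 == 0

-- inner 'for _ in range(index): place_value *= 10' loop of transformListInNumber
def placeValue (i : Int) : Int :=
  (PySem.List.pyRange 0 i 1).foldl (fun pv _ => pv * 10) 1

def transformListInNumber (l : List Int) : Int :=
  (PySem.List.enumerate (PySem.List.sorted l (fun x => x))).foldl
    (fun acc p => acc + p.2 * placeValue p.1) 0

-- 'while not is3multiple(data): data.pop()'  (pop() on the guarded nonempty list = dropLast)
def popLoop (d : List Int) : List Int :=
  if is3multiple d then d else popLoop d.dropLast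
termination_by d.length
decreasing_by
  simp only [is3multiple] at *
  by_cases hd : d.length = 0
  · simp_all
  · simp [List.length_dropLast]; omega

def solution (l : List Int) : Int :=
  let data := sort_and_reverse l
  let data2 := popLoop data
  if data2.length ≠ 0 then transformListInNumber data2
  else
    match (sort_and_reverse l).find? (fun n => PySem.Int.mod n 3 == 0) with
    | some n => n
    | none => 0

-- ===== PORT B =====
-- 'for x in desc: num = num*10+x; s += x; if s % 3 == 0: best = num' — one scan, state (best, num, s)
def scanStep (st : Option Int × Int × Int) (x : Int) : Option Int × Int × Int :=
  let num := st.2.1 * 10 + x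
  let s := st.2.2 + x
  (if PySem.Int.mod s 3 == 0 then some num else st.1, num, s)

def solution_alt (l : List Int) : Int :=
  let desc := (PySem.List.sorted l (fun x => x)).reverse   -- sorted(l)[::-1]
  match (desc.foldl scanStep (none, 0, 0)).1 with
  | some num => num
  | none =>
      match desc.find? (fun x => PySem.Int.mod x 3 == 0) with
      | some x => x
      | none => 0

-- ===== PRECONDITION & SPEC =====
def Spec_solution (l : List Int) (out : Int) : Prop := out = solution_alt l
instance (l : List Int) (out : Int) : Decidable (Spec_solution l out) := by unfold Spec_solution; infer_instance

-- ===== CLAIM (what is proved, stated in full; the proofs are below) =====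
def Claim_equal_solution : Prop := ∀ (l : List Int), Dom_solution l → Spec_solution l (solution l)

-- ===== LEMMAS AND PROOFS =====

-- Horner value the forward scan computes
def hornerF (d : List Int) : Int := d.foldl (fun num x => num * 10 + x) 0

-- the 'best' component the scan ends with, characterised by chopping from the right
def bestD (d : List Int) : Option Int :=
  if hd : d = [] then none
  else if PySem.Int.mod d.sum 3 == 0 then some (hornerF d) else bestD d.dropLast
termination_by d.length
decreasing_by
  have : d.length ≠ 0 := fun h => hd (List.eq_nil_of_length_eq_zero h)
  simp [List.length_dropLast]; omega

theorem scan_inv (d : List Int) :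
    d.foldl scanStep (none, 0, 0) = (bestD d, hornerF d, d.sum) := by
  induction d using List.reverseRecOn with
  | nil => rw [bestD]; simp [hornerF]
  | append_singleton xs x ih =>
      have hne : xs ++ [x] ≠ [] := by simp
      have hh : hornerF (xs ++ [x]) = hornerF xs * 10 + x := by simp [hornerF]
      have hsum : (xs ++ [x]).sum = xs.sum + x := by simp
      rw [List.foldl_append, ih]
      conv_rhs => rw [bestD]
      rw [dif_neg hne, List.dropLast_concat, hh, hsum]
      simp only [List.foldl_cons, List.foldl_nil, scanStep]

theorem popLoop_bestD (d : List Int) :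
    bestD d = if popLoop d = [] then none else some (hornerF (popLoop d)) := by
  by_cases hd : d = []
  · subst hd
    rw [bestD, popLoop]; simp [is3multiple]
  · have hlen : d.length ≠ 0 := fun h => hd (List.eq_nil_of_length_eq_zero h)
    have h3 : is3multiple d = (PySem.Int.mod d.sum 3 == 0) := by
      simp [is3multiple, hlen]
    by_cases hmod : (PySem.Int.mod d.sum 3 == 0) = true
    · have hp : popLoop d = d := by rw [popLoop, h3, if_pos hmod]
      rw [bestD, dif_neg hd, if_pos hmod, hp, if_neg hd]
    · have hp : popLoop d = popLoop d.dropLast := by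
        rw [popLoop, h3, if_neg (by simpa using hmod)]
      rw [bestD, dif_neg hd, if_neg hmod, hp]
      exact popLoop_bestD d.dropLast
termination_by d.length
decreasing_by
  cases d with
  | nil => exact absurd rfl hd
  | cons a t => simp [List.length_dropLast]

theorem popLoop_prefix (d : List Int) : popLoop d <+: d := by
  rw [popLoop]
  split_ifs with h
  · exact List.prefix_refl d
  · have hd : d ≠ [] := by rintro rfl; simp [is3multiple] at h
    exact (popLoop_prefix d.dropLast).trans (List.dropLast_prefix d)
termination_by d.length
decreasing_by
  cases d with
  | nil => exact absurd rfl hd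
  | cons a t => simp [List.length_dropLast]

theorem foldl_mul10 (xs : List Int) (c : Int) :
    xs.foldl (fun pv _ => pv * 10) c = c * 10 ^ xs.length := by
  induction xs generalizing c with
  | nil => simp
  | cons x t ih => simp [List.foldl_cons, ih, pow_succ]; ring

theorem placeValue_natCast (j : Nat) : placeValue (j : Int) = 10 ^ j := by
  unfold placeValue
  rw [PySem.List.pyRange_zero_natCast, foldl_mul10]
  simp

-- digit-list value read least-significant-first (what transformListInNumber computes)
def hornerV (a : List Int) : Int := a.foldr (fun x n => n * 10 + x) 0

theorem enum_fold (a : List Int) : ∀ (j : Nat) (acc : Int),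
    (PySem.List.enumerate a (j : Int)).foldl (fun acc p => acc + p.2 * placeValue p.1) acc
      = acc + hornerV a * 10 ^ j := by
  induction a with
  | nil => intro j acc; simp [PySem.List.enumerate_nil, hornerV]
  | cons x t ih =>
      intro j acc
      rw [PySem.List.enumerate_cons]
      have hj1 : (j : Int) + 1 = ((j + 1 : Nat) : Int) := by push_cast; ring
      simp only [List.foldl_cons, hj1, ih (j + 1)]
      simp [hornerV, placeValue_natCast, pow_succ]
      ring

theorem transform_eq (m : List Int) :
    transformListInNumber m = hornerV (PySem.List.sorted m (fun x => x)) := by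
  unfold transformListInNumber
  have h := enum_fold (PySem.List.sorted m (fun x => x)) 0 0
  simpa using h

theorem sorted_reverse_of_pairwise (m : List Int) (hm : m.Pairwise (· ≤ ·)) :
    PySem.List.sorted m.reverse (fun x => x) = m :=
  PySem.List.sorted_id_eq_of_perm_of_pairwise _ _ (List.reverse_perm m).symm hm

theorem hornerV_reverse (p : List Int) : hornerV p.reverse = hornerF p := by
  unfold hornerV hornerF
  rw [List.foldr_reverse]

theorem transform_popLoop (l : List Int) :
    transformListInNumber (popLoop (sort_and_reverse l)) =
      hornerF (popLoop (sort_and_reverse l)) := by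
  set p := popLoop (sort_and_reverse l) with hp
  have hpw : p.reverse.Pairwise (· ≤ ·) := by
    rw [List.pairwise_reverse]
    exact List.Pairwise.sublist (popLoop_prefix (sort_and_reverse l)).sublist
      (by rw [sort_and_reverse, List.pairwise_reverse]
          exact PySem.List.sorted_pairwise l (fun x => x))
  rw [transform_eq]
  have : PySem.List.sorted p (fun x => x) = p.reverse := by
    have := sorted_reverse_of_pairwise p.reverse hpw
    rwa [List.reverse_reverse] at this
  rw [this, hornerV_reverse]

theorem main_eq (l : List Int) : solution l = solution_alt l := by
  have hfold : (PySem.List.sorted l (fun x => x)).reverse = sort_and_reverse l := rfl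
  simp only [solution, solution_alt]
  rw [hfold, scan_inv, popLoop_bestD]
  by_cases h : popLoop (sort_and_reverse l) = []
  · simp [h]
  · have hlen : (popLoop (sort_and_reverse l)).length ≠ 0 :=
      fun hc => h (List.eq_nil_of_length_eq_zero hc)
    rw [if_pos hlen, if_neg h]
    exact transform_popLoop l

-- ===== VERDICT (by name: the statement is the Claim_ definition above) =====
theorem solution_spec : Claim_equal_solution := by
  intro l _
  unfold Spec_solution
  exact main_eq l
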